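-- pv_equiv track=rewrite | github.com/trevorbye/tweet_generator | generator.py | clean_token_list
-- ===== SOURCE A (Python) =====
-- def clean_token_list(token_list):
--     cleaned_list = []
--     filter_terms = ["http", "&amp;", "-", "&gt;"]
--
--     for token in token_list:
--         add = True
--         for filter_term in filter_terms:
--             if filter_term in token:
--                 add = False
--                 break
--
--         if add:
--             trimmed_token = token.replace("\"", "")
--             cleaned_list.append(trimmed_token)
--
--     return cleaned_list
-- ===== SOURCE B (Python) =====
-- FILTER_TERMS = ["http", "&amp;", "-", "&gt;"]
--
-- def clean_token_list(token_list):
--     # staged sieve: one full pass over the (shrinking) list per banned term,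
--     # then a final pass stripping quotes
--     survivors = token_list
--     for term in FILTER_TERMS:
--         survivors = [t for t in survivors if term not in t]
--     return [t.replace('"', '') for t in survivors]
-- ===== Notes on version B (the rewrite author's own statement) =====
-- stated objective: alternative
-- what changed: Inverts the loop nesting: instead of A's single pass over tokens with an inner per-token loop over the four banned terms (break flag, accumulator append), B runs one staged sieve pass over the whole list per banned term (four successive list filters over a shrinking survivor list) followed by a separate quote-stripping map pass.
import Mathlib
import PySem

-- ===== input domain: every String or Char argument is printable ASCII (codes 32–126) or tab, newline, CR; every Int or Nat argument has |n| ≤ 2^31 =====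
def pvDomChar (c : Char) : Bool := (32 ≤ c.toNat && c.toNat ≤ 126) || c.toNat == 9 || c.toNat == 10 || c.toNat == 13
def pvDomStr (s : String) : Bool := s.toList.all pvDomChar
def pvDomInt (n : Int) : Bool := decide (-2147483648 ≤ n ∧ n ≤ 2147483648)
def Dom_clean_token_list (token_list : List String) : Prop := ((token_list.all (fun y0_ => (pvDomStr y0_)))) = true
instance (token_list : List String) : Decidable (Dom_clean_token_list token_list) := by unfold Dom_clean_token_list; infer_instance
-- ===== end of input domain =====

-- B inverts the loop nesting: instead of A's single pass over tokens with an inner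
-- per-token loop over the four banned terms, B runs one staged sieve pass over the whole
-- list per banned term, then a separate quote-stripping map pass (objective: alternative).

-- ===== PORT A =====
-- inner 'for filter_term in filter_terms: if filter_term in token: add = False; break'
def cleanInner : List String → String → Bool
  | [], _ => true
  | ft :: rest, token => if PySem.Str.isIn ft token then false else cleanInner rest token

def clean_token_list (token_list : List String) : List String :=
  token_list.foldl
    (fun cleaned_list token =>
      let add := cleanInner ["http", "&amp;", "-", "&gt;"] token
      if add then cleaned_list ++ [PySem.Str.replace token "\"" ""] else cleaned_list)
    []

-- ===== PORT B =====
-- 'for term in FILTER_TERMS: survivors = [t for t in survivors if term not in t]'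
def clean_token_list_alt (token_list : List String) : List String :=
  (["http", "&amp;", "-", "&gt;"].foldl
      (fun survivors term => survivors.filter (fun t => !PySem.Str.isIn term t))
      token_list).map
    (fun t => PySem.Str.replace t "\"" "")

-- ===== PRECONDITION & SPEC =====
def Spec_clean_token_list (token_list : List String) (out : List String) : Prop := out = clean_token_list_alt token_list
instance (token_list : List String) (out : List String) : Decidable (Spec_clean_token_list token_list out) := by unfold Spec_clean_token_list; infer_instance

-- ===== CLAIM (what is proved, stated in full; the proofs are below) =====
def Claim_equal_clean_token_list : Prop := ∀ (token_list : List String), Dom_clean_token_list token_list → Spec_clean_token_list token_list (clean_token_list token_list)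

-- ===== LEMMAS AND PROOFS =====

-- B's four staged filters over the list equal one filter by A's inner break-loop predicate
theorem staged_filter_eq (xs : List String) :
    (["http", "&amp;", "-", "&gt;"].foldl
        (fun survivors term => survivors.filter (fun t => !PySem.Str.isIn term t))
        xs)
      = xs.filter (cleanInner ["http", "&amp;", "-", "&gt;"]) := by
  simp only [List.foldl, List.filter_filter]
  apply List.filter_congr
  intro t _
  simp only [cleanInner, PySem.Str.isIn_eq]
  cases PySem.Chars.isIn "http".toList t.toList <;>
    cases PySem.Chars.isIn "&amp;".toList t.toList <;>
    cases PySem.Chars.isIn "-".toList t.toList <;>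
    cases PySem.Chars.isIn "&gt;".toList t.toList <;> rfl

-- ===== VERDICT (by name: the statement is the Claim_ definition above) =====
theorem clean_token_list_spec : Claim_equal_clean_token_list := by
  intro token_list _
  show _ = _
  unfold clean_token_list clean_token_list_alt
  rw [staged_filter_eq]
  rw [PySem.List.foldl_append_if (cleanInner ["http", "&amp;", "-", "&gt;"])
      (fun t => PySem.Str.replace t "\"" "")]
  simp
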